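-- pv_equiv track=rewrite | github.com/Ormorshtein/elastic-usage-gateway | gateway/index_arch.py | partition_by_group
-- ===== SOURCE A (Python) =====
-- def partition_by_group(
--     rows: list[dict],
--     index_to_group: dict[str, str],
-- ) -> dict[str, list[dict]]:
--     """Partition _cat/indices or _cat/shards rows by index group.
--
--     Args:
--         rows: List of dicts from _cat API (each has an "index" key).
--         index_to_group: Mapping from concrete index name to group name.
--
--     Returns:
--         Dict mapping group name to list of rows.
--     """
--     result: dict[str, list[dict]] = {}
--     for row in rows:
--         idx_name = row.get("index", "")
--         group = index_to_group.get(idx_name)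
--         if group:
--             result.setdefault(group, []).append(row)
--     return result
-- ===== SOURCE B (Python) =====
-- def partition_by_group(
--     rows: list[dict],
--     index_to_group: dict[str, str],
-- ) -> dict[str, list[dict]]:
--     """Partition _cat rows by index group (resolve-tag, dedup keys, per-group filter)."""
--     tagged = [(index_to_group.get(row.get("index", "")), row) for row in rows]
--     groups: list[str] = []
--     for g, _ in tagged:
--         if g and g not in groups:
--             groups.append(g)
--     return {g: [row for gg, row in tagged if gg == g] for g in groups}
-- ===== Notes on version B (the rewrite author's own statement) =====
-- stated objective: alternative
-- what changed: Replaces the single-pass dict-accumulator (setdefault+append per row) with a resolve-then-group decomposition: tag every row with its resolved group once, dedup the truthy group names in first-appearance order, then build each group's row list by a per-group filter over the tagged list.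
import Mathlib
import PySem

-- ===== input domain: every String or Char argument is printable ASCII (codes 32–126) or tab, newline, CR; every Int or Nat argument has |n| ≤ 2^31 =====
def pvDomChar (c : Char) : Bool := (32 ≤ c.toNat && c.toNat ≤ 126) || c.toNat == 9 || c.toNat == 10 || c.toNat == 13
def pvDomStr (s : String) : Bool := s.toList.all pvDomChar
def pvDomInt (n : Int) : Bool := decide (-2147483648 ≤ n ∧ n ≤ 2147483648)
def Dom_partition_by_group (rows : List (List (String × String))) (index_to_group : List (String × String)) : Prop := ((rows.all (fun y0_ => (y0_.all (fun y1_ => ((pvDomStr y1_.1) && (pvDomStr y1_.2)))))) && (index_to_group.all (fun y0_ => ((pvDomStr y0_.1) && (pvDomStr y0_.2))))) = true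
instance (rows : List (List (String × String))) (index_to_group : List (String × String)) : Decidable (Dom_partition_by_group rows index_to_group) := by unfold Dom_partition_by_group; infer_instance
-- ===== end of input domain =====

-- B replaces A's single-pass dict accumulator by resolve-tag / dedup-groups / per-group filter (alternative decomposition, same results).

-- ===== PORT A =====
-- result.setdefault(group, []).append(row)  ==  result[group] = result.get(group, []) + [row]  ==  Dict.modify
def partition_by_group (rows : List (List (String × String))) (index_to_group : List (String × String)) : List (String × List (List (String × String))) :=
  (rows.foldl (fun result row =>
    let idx_name := (PySem.Dict.mk row).getD "index" ""
    let group := (PySem.Dict.mk index_to_group).get? idx_name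
    match group with
    | some g => if g ≠ "" then result.modify g [] (· ++ [row]) else result
    | none => result) PySem.Dict.empty).items

-- ===== PORT B =====
def pbgTagged (rows : List (List (String × String))) (index_to_group : List (String × String)) : List (Option String × List (String × String)) :=
  rows.map (fun row => ((PySem.Dict.mk index_to_group).get? ((PySem.Dict.mk row).getD "index" ""), row))

def partition_by_group_alt (rows : List (List (String × String))) (index_to_group : List (String × String)) : List (String × List (List (String × String))) :=
  let tagged := pbgTagged rows index_to_group
  let groups := tagged.foldl (fun groups p =>
    match p.1 with
    | some g => if g ≠ "" then PySem.Set.add groups g else groups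
    | none => groups) []
  groups.map (fun g => (g, (tagged.filter (fun p => p.1 == some g)).map (·.2)))

-- ===== PRECONDITION & SPEC =====
def Spec_partition_by_group (rows : List (List (String × String))) (index_to_group : List (String × String)) (out : List (String × List (List (String × String)))) : Prop := out = partition_by_group_alt rows index_to_group
instance (rows : List (List (String × String))) (index_to_group : List (String × String)) (out : List (String × List (List (String × String)))) : Decidable (Spec_partition_by_group rows index_to_group out) := by unfold Spec_partition_by_group; infer_instance

-- ===== CLAIM (what is proved, stated in full; the proofs are below) =====
def Claim_equal_partition_by_group : Prop := ∀ (rows : List (List (String × String))) (index_to_group : List (String × String)), Dom_partition_by_group rows index_to_group → Spec_partition_by_group rows index_to_group (partition_by_group rows index_to_group)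

-- ===== LEMMAS AND PROOFS =====

def pbgKraw (index_to_group : List (String × String)) (row : List (String × String)) : Option String :=
  (PySem.Dict.mk index_to_group).get? ((PySem.Dict.mk row).getD "index" "")

def pbgPairs (rows : List (List (String × String))) (index_to_group : List (String × String)) : List (String × List (String × String)) :=
  rows.filterMap (fun row => match pbgKraw index_to_group row with
    | some g => if g ≠ "" then some (g, row) else none
    | none => none)

lemma pbgPairs_fst_ne (rows : List (List (String × String))) (itg : List (String × String)) :
    ∀ p ∈ pbgPairs rows itg, p.1 ≠ "" := by
  intro p hp
  simp only [pbgPairs, List.mem_filterMap] at hp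
  obtain ⟨r, -, h⟩ := hp
  rcases hk : pbgKraw itg r with _ | g <;> rw [hk] at h
  · simp at h
  · by_cases hg : g = ""
    · simp [hg] at h
    · simp [hg] at h
      subst h
      exact hg

lemma pbgA_fold (rows : List (List (String × String))) (itg : List (String × String))
    (d : PySem.Dict String (List (List (String × String)))) :
    rows.foldl (fun result row =>
      let idx_name := (PySem.Dict.mk row).getD "index" ""
      let group := (PySem.Dict.mk itg).get? idx_name
      match group with
      | some g => if g ≠ "" then result.modify g [] (· ++ [row]) else result
      | none => result) d
    = (pbgPairs rows itg).foldl (fun d p => d.modify p.1 [] (· ++ [p.2])) d := by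
  induction rows generalizing d with
  | nil => rfl
  | cons r rs ih =>
    simp only [List.foldl_cons, pbgPairs, List.filterMap_cons]
    cases hk : pbgKraw itg r with
    | none =>
      simp only [pbgKraw] at hk
      simp only [hk]
      simpa [pbgPairs] using ih d
    | some g =>
      simp only [pbgKraw] at hk
      by_cases hg : g = ""
      · simp only [hk, hg]
        simpa [pbgPairs] using ih d
      · simp only [hk, if_pos hg, List.foldl_cons]
        simpa [pbgPairs] using ih (d.modify g [] (· ++ [r]))

lemma pbgB_groups (rows : List (List (String × String))) (itg : List (String × String))
    (s : List String) :
    (pbgTagged rows itg).foldl (fun groups p =>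
      match p.1 with
      | some g => if g ≠ "" then PySem.Set.add groups g else groups
      | none => groups) s
    = PySem.Set.update s ((pbgPairs rows itg).map (·.1)) := by
  induction rows generalizing s with
  | nil => simp [pbgTagged, pbgPairs, PySem.Set.update_nil]
  | cons r rs ih =>
    simp only [pbgTagged, List.map_cons, List.foldl_cons, pbgPairs, List.filterMap_cons]
    cases hk : pbgKraw itg r with
    | none =>
      simp only [pbgKraw] at hk
      simp only [hk]
      simpa [pbgTagged, pbgPairs] using ih s
    | some g =>
      simp only [pbgKraw] at hk
      by_cases hg : g = ""
      · simp only [hk, hg]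
        simpa [pbgTagged, pbgPairs] using ih s
      · simp only [hk, if_pos hg, List.map_cons]
        rw [PySem.Set.update_cons]
        simpa [pbgTagged, pbgPairs] using ih (PySem.Set.add s g)

lemma pbgB_filter (rows : List (List (String × String))) (itg : List (String × String))
    (g : String) (hg : g ≠ "") :
    ((pbgTagged rows itg).filter (fun p => p.1 == some g)).map (·.2)
    = ((pbgPairs rows itg).filter (fun p => p.1 == g)).map (·.2) := by
  induction rows with
  | nil => rfl
  | cons r rs ih =>
    simp only [pbgTagged, List.map_cons, List.filter_cons, pbgPairs, List.filterMap_cons]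
    cases hk : pbgKraw itg r with
    | none =>
      simp only [pbgKraw] at hk
      simp only [hk]
      simpa [pbgTagged, pbgPairs] using ih
    | some g' =>
      simp only [pbgKraw] at hk
      by_cases hg' : g' = ""
      · subst hg'
        have hne : ((some "" : Option String) == some g) = false := by
          simp [Ne.symm hg]
        simp only [hk, hne, Bool.false_eq_true]
        simpa [pbgTagged, pbgPairs] using ih
      · by_cases he : g' = g
        · subst he
          simp only [hk, if_pos hg', List.filter_cons]
          simp only [beq_self_eq_true, if_pos, List.map_cons]
          congr 1
        · have h1 : ((some g' : Option String) == some g) = false := by simp [he]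
          have h2 : (g' == g) = false := by simp [he]
          simp only [hk, if_pos hg', List.filter_cons, h1, h2, Bool.false_eq_true]
          simpa [pbgTagged, pbgPairs] using ih

-- ===== VERDICT (by name: the statement is the Claim_ definition above) =====
theorem partition_by_group_spec : Claim_equal_partition_by_group := by
  intro rows itg _
  unfold Spec_partition_by_group partition_by_group partition_by_group_alt
  rw [pbgA_fold rows itg]
  simp only [pbgB_groups rows itg, PySem.Set.update_nil_left]
  have hnd : ((pbgPairs rows itg).foldl (fun d p => d.modify p.1 [] (· ++ [p.2]))
      PySem.Dict.empty).keys.Nodup :=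
    PySem.Dict.nodup_keys_foldl_modify_key _ _ _ _ _ (by simp)
  rw [PySem.Dict.items_eq_map_keys _ hnd [], PySem.Dict.keys_foldl_modify_key]
  simp only [PySem.Dict.keys_empty, PySem.Set.update_nil_left]
  apply List.map_congr_left
  intro g hgmem
  have hg : g ≠ "" := by
    have hm := (PySem.List.mem_dedup _ _).mp hgmem
    obtain ⟨p, hp, hpe⟩ := List.mem_map.mp hm
    exact hpe ▸ pbgPairs_fst_ne rows itg p hp
  rw [PySem.Dict.getD_foldl_modify_append, pbgB_filter rows itg g hg]
  simp [PySem.Dict.getD_empty]
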